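-- pv_equiv track=rewrite | github.com/AriaDesta2083/ftsc | FTSC.py | HimpunanFuzzy
-- ===== SOURCE A (Python) =====
-- def HimpunanFuzzy(panjang_interval, jumlah_interval, u):
--     list_kelas = []
--     list_bawah = []
--     list_atas = []
--     list_tengah = []
--     dict_nilai_tengah = {}
--     nilai = u[0]
--     for i in range(1, jumlah_interval + 1):
--         kelas = f"A{i}"
--         bawah = nilai
--         atas = nilai + panjang_interval
--         tengah = round((bawah + atas) / 2)
--         list_kelas.append(kelas)
--         list_bawah.append(bawah)
--         list_atas.append(atas)
--         list_tengah.append(tengah)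
--         nilai = atas
--     for i in range(1, len(list_kelas) + 1):
--         dict_nilai_tengah[list_kelas[i - 1]] = list_tengah[i - 1]
--     return list_kelas, list_bawah, list_atas, list_tengah, dict_nilai_tengah
-- ===== SOURCE B (Python) =====
-- def HimpunanFuzzy(panjang_interval, jumlah_interval, u):
--     u0 = u[0]
--     idxs = list(range(1, jumlah_interval + 1))
--     list_kelas = [f"A{i}" for i in idxs]
--     list_bawah = [u0 + (i - 1) * panjang_interval for i in idxs]
--     list_atas = [b + panjang_interval for b in list_bawah]
--     list_tengah = [round((b + a) / 2) for b, a in zip(list_bawah, list_atas)]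
--     return list_kelas, list_bawah, list_atas, list_tengah, dict(zip(list_kelas, list_tengah))
-- ===== Notes on version B (the rewrite author's own statement) =====
-- stated objective: simpler
-- what changed: Replaces the running 'nilai' accumulator loop and the second re-indexing dict loop with direct closed-form comprehensions over the index range (bawah = u[0] + (i-1)*panjang_interval) and dict(zip(...)).
import Mathlib
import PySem

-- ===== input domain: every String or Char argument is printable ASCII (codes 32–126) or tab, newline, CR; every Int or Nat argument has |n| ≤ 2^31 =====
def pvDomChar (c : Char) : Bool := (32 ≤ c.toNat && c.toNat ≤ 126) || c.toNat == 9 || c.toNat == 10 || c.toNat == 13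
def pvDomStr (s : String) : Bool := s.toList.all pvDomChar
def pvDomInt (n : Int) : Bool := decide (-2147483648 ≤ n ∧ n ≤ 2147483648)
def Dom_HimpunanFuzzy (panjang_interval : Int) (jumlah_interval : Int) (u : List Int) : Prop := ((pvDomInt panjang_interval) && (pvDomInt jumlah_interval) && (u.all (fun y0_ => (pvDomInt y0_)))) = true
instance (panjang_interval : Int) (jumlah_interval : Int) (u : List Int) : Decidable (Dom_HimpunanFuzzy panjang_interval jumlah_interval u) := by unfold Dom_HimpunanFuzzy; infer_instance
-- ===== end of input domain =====

-- B replaces A's running accumulator and second re-indexing loop by closed-form comprehensions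
-- over the index range and a direct zip for the dict (objective: simpler).

-- ===== PORT A =====
-- shared helper: exact port of Python's 'round((bawah + atas) / 2)' for integer bawah, atas
-- (round-half-to-even on the exact rational s/2), which both Pythons contain verbatim
def pyRoundHalf (s : Int) : Int :=
  let k := PySem.Int.floordiv s 2
  if PySem.Int.mod s 2 = 0 then k else if PySem.Int.mod k 2 = 0 then k else k + 1

def HimpunanFuzzy (panjang_interval : Int) (jumlah_interval : Int) (u : List Int) : List String × List Int × List Int × List Int × (List (String × Int)) :=
  -- nilai = u[0]  (IndexError on empty u: Pre_ excludes u = [])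
  let nilai0 : Int := (PySem.List.pyGet? u 0).getD 0
  let st :=
    (PySem.List.pyRange 1 (jumlah_interval + 1) 1).foldl
      (fun (st : List String × List Int × List Int × List Int × Int) i =>
        let kelas := "A" ++ PySem.Int.toStr i
        let bawah := st.2.2.2.2
        let atas := st.2.2.2.2 + panjang_interval
        let tengah := pyRoundHalf (bawah + atas)
        (st.1 ++ [kelas], st.2.1 ++ [bawah], st.2.2.1 ++ [atas], st.2.2.2.1 ++ [tengah], atas))
      ([], [], [], [], nilai0)
  let d :=
    (PySem.List.pyRange 1 ((st.1.length : Int) + 1) 1).foldl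
      (fun d i => PySem.Dict.insert d (PySem.List.pyGetD st.1 (i - 1) "") (PySem.List.pyGetD st.2.2.2.1 (i - 1) 0))
      PySem.Dict.empty
  (st.1, st.2.1, st.2.2.1, st.2.2.2.1, d.items)

-- ===== PORT B =====
def HimpunanFuzzy_alt (panjang_interval : Int) (jumlah_interval : Int) (u : List Int) : List String × List Int × List Int × List Int × (List (String × Int)) :=
  let u0 : Int := (PySem.List.pyGet? u 0).getD 0
  let idxs := PySem.List.pyRange 1 (jumlah_interval + 1) 1
  let list_kelas := idxs.map (fun i => "A" ++ PySem.Int.toStr i)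
  let list_bawah := idxs.map (fun i => u0 + (i - 1) * panjang_interval)
  let list_atas := list_bawah.map (fun b => b + panjang_interval)
  let list_tengah := (list_bawah.zip list_atas).map (fun ba => pyRoundHalf (ba.1 + ba.2))
  (list_kelas, list_bawah, list_atas, list_tengah, list_kelas.zip list_tengah)

-- ===== PRECONDITION & SPEC =====
-- Pre_ excludes exactly the inputs where A raises: u = [] (IndexError on u[0]).
def Pre_HimpunanFuzzy (panjang_interval : Int) (jumlah_interval : Int) (u : List Int) : Prop := u ≠ []
instance (panjang_interval : Int) (jumlah_interval : Int) (u : List Int) : Decidable (Pre_HimpunanFuzzy panjang_interval jumlah_interval u) := by unfold Pre_HimpunanFuzzy; infer_instance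
def pvWitness_HimpunanFuzzy : Int × Int × List Int := (5, 3, [10])

def Spec_HimpunanFuzzy (panjang_interval : Int) (jumlah_interval : Int) (u : List Int) (out : List String × List Int × List Int × List Int × (List (String × Int))) : Prop := out = HimpunanFuzzy_alt panjang_interval jumlah_interval u
instance (panjang_interval : Int) (jumlah_interval : Int) (u : List Int) (out : List String × List Int × List Int × List Int × (List (String × Int))) : Decidable (Spec_HimpunanFuzzy panjang_interval jumlah_interval u out) := by unfold Spec_HimpunanFuzzy; infer_instance

-- ===== CLAIM (what is proved, stated in full; the proofs are below) =====
def Claim_equal_HimpunanFuzzy : Prop := ∀ (panjang_interval : Int) (jumlah_interval : Int) (u : List Int), Dom_HimpunanFuzzy panjang_interval jumlah_interval u → Pre_HimpunanFuzzy panjang_interval jumlah_interval u → Spec_HimpunanFuzzy panjang_interval jumlah_interval u (HimpunanFuzzy panjang_interval jumlah_interval u)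

-- ===== LEMMAS AND PROOFS =====

-- digitChar is injective below 10
theorem pv_digitChar_inj {a b : Nat} (ha : a < 10) (hb : b < 10) (h : Nat.digitChar a = Nat.digitChar b) : a = b := by
  interval_cases a <;> interval_cases b <;> simp_all [Nat.digitChar]

-- Nat.toDigits 10 is injective
theorem pv_toDigits_inj : ∀ (a b : Nat), Nat.toDigits 10 a = Nat.toDigits 10 b → a = b := by
  intro a
  induction a using Nat.strong_induction_on with
  | _ a ih =>
    intro b h
    have ea : ¬ a < 10 → Nat.toDigits 10 a = Nat.toDigits 10 (a / 10) ++ [(a % 10).digitChar] := by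
      intro h1; rw [Nat.toDigits_eq_if (by norm_num), if_neg h1]
    have eb : ¬ b < 10 → Nat.toDigits 10 b = Nat.toDigits 10 (b / 10) ++ [(b % 10).digitChar] := by
      intro h2; rw [Nat.toDigits_eq_if (by norm_num), if_neg h2]
    by_cases h1 : a < 10 <;> by_cases h2 : b < 10
    · rw [Nat.toDigits_of_lt_base h1, Nat.toDigits_of_lt_base h2] at h
      injection h with h' _
      exact pv_digitChar_inj h1 h2 h'
    · rw [Nat.toDigits_of_lt_base h1, eb h2] at h
      have hl := congrArg List.length h
      have hp := @Nat.length_toDigits_pos 10 (b / 10)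
      simp only [List.length_append, List.length_cons, List.length_nil] at hl
      omega
    · rw [Nat.toDigits_of_lt_base h2, ea h1] at h
      have hl := congrArg List.length h
      have hp := @Nat.length_toDigits_pos 10 (a / 10)
      simp only [List.length_append, List.length_cons, List.length_nil] at hl
      omega
    · rw [ea h1, eb h2] at h
      have hlen : (Nat.toDigits 10 (a / 10)).length = (Nat.toDigits 10 (b / 10)).length := by
        have := congrArg List.length h
        simp at this; omega
      obtain ⟨hpre, hlast⟩ := List.append_inj h hlen
      have hmod : a % 10 = b % 10 :=
        pv_digitChar_inj (Nat.mod_lt _ (by norm_num)) (Nat.mod_lt _ (by norm_num)) (by simpa using hlast)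
      have hdiv : a / 10 = b / 10 := ih (a / 10) (Nat.div_lt_self (by omega) (by norm_num)) _ hpre
      omega

-- the class-name function is injective in the (positive) index
theorem pv_kelas_inj {i j : Int} (hi : 0 < i) (hj : 0 < j)
    (h : "A" ++ PySem.Int.toStr i = "A" ++ PySem.Int.toStr j) : i = j := by
  have h' : PySem.Int.toStr i = PySem.Int.toStr j := (String.append_right_inj "A").mp h
  have h2 : PySem.Int.toChars i = PySem.Int.toChars j := by
    have := congrArg String.toList h'
    simpa [PySem.Int.toList_toStr] using this
  unfold PySem.Int.toChars at h2
  rw [if_neg (by omega), if_neg (by omega)] at h2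
  have := pv_toDigits_inj i.toNat j.toNat h2
  omega

-- the list of class names has no duplicate keys
theorem pv_kelas_nodup (b : Int) :
    ((PySem.List.pyRange 1 b 1).map (fun i => "A" ++ PySem.Int.toStr i)).Nodup := by
  apply List.Nodup.map_on
  · intro i hi j hj h
    rw [PySem.List.mem_pyRange_one] at hi hj
    exact pv_kelas_inj (by omega) (by omega) h
  · exact PySem.List.nodup_pyRange_one 1 b

-- A's first loop, characterised in closed form
theorem pv_loopA (p u0 : Int) (n : Nat) :
    (((List.range n).map (fun (k : Nat) => (1 : Int) + (k : Int))).foldl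
      (fun (st : List String × List Int × List Int × List Int × Int) i =>
        (st.1 ++ ["A" ++ PySem.Int.toStr i], st.2.1 ++ [st.2.2.2.2],
         st.2.2.1 ++ [st.2.2.2.2 + p], st.2.2.2.1 ++ [pyRoundHalf (st.2.2.2.2 + (st.2.2.2.2 + p))],
         st.2.2.2.2 + p))
      ([], [], [], [], u0))
    = ((List.range n).map (fun (k : Nat) => "A" ++ PySem.Int.toStr (1 + (k : Int))),
       (List.range n).map (fun (k : Nat) => u0 + (k : Int) * p),
       (List.range n).map (fun (k : Nat) => u0 + (k : Int) * p + p),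
       (List.range n).map (fun (k : Nat) => pyRoundHalf (u0 + (k : Int) * p + (u0 + (k : Int) * p + p))),
       u0 + (n : Int) * p) := by
  induction n with
  | zero => norm_num
  | succ n ih =>
    rw [List.range_succ]
    simp only [List.map_append, List.foldl_append, List.map_cons, List.map_nil, List.foldl_cons, List.foldl_nil]
    rw [ih]
    push_cast
    simp only [Prod.mk.injEq, true_and]
    ring

-- a fold of fresh-key inserts over the index range builds exactly the zip
theorem pv_dict_zip (lk : List String) (lt : List Int) (hlen : lk.length = lt.length) (hnd : lk.Nodup) :
    ((PySem.List.pyRange 1 ((lk.length : Int) + 1) 1).foldl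
      (fun d i => PySem.Dict.insert d (PySem.List.pyGetD lk (i - 1) "") (PySem.List.pyGetD lt (i - 1) 0))
      PySem.Dict.empty).items = lk.zip lt := by
  have hmapk : (PySem.List.pyRange 1 ((lk.length : Int) + 1) 1).map (fun i => PySem.List.pyGetD lk (i - 1) "") = lk := by
    rw [PySem.List.pyRange_one]
    simp only [List.map_map]
    apply List.ext_getElem (by simp)
    intro k h1 h2
    simp only [List.getElem_map, List.getElem_range, Function.comp]
    rw [show (1 : Int) + k - 1 = (k : Int) by ring]
    rw [PySem.List.pyGetD_eq_getElem lk "" (by positivity) (by omega)]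
    simp
  have hmapv : (PySem.List.pyRange 1 ((lk.length : Int) + 1) 1).map (fun i => PySem.List.pyGetD lt (i - 1) 0) = lt := by
    rw [PySem.List.pyRange_one]
    simp only [List.map_map]
    apply List.ext_getElem (by simp [hlen])
    intro k h1 h2
    simp only [List.getElem_map, List.getElem_range, Function.comp]
    rw [show (1 : Int) + k - 1 = (k : Int) by ring]
    rw [PySem.List.pyGetD_eq_getElem lt 0 (by positivity) (by omega)]
    simp
  rw [PySem.Dict.items_foldl_insert_fresh]
  · rw [← List.zip_map' (f := fun i => PySem.List.pyGetD lk (i - 1) "") (g := fun i => PySem.List.pyGetD lt (i - 1) 0), hmapk, hmapv]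
    simp [PySem.Dict.empty]
  · intro a _; simp [PySem.Dict.contains_empty]
  · rw [hmapk]; exact hnd

-- ===== VERDICT (by name: the statement is the Claim_ definition above) =====
theorem HimpunanFuzzy_spec : Claim_equal_HimpunanFuzzy := by
  intro p j u _ _
  unfold Spec_HimpunanFuzzy HimpunanFuzzy HimpunanFuzzy_alt
  dsimp only
  set u0 : Int := (PySem.List.pyGet? u 0).getD 0 with hu0
  set n : Nat := (j + 1 - 1).toNat with hn
  have hrange : PySem.List.pyRange 1 (j + 1) 1 = (List.range n).map (fun (k : Nat) => (1 : Int) + (k : Int)) := by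
    rw [PySem.List.pyRange_one, hn]
  rw [hrange]
  rw [pv_loopA p u0 n]
  simp only
  have hkel : (List.range n).map (fun (k : Nat) => "A" ++ PySem.Int.toStr (1 + (k : Int)))
      = ((List.range n).map (fun (k : Nat) => (1 : Int) + (k : Int))).map (fun i => "A" ++ PySem.Int.toStr i) := by
    simp [List.map_map, Function.comp]
  have hbw : (List.range n).map (fun (k : Nat) => u0 + (k : Int) * p)
      = ((List.range n).map (fun (k : Nat) => (1 : Int) + (k : Int))).map (fun i => u0 + (i - 1) * p) := by
    simp only [List.map_map]
    apply List.map_congr_left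
    intro k _
    simp only [Function.comp]
    ring_nf
  have hat : (List.range n).map (fun (k : Nat) => u0 + (k : Int) * p + p)
      = (((List.range n).map (fun (k : Nat) => (1 : Int) + (k : Int))).map (fun i => u0 + (i - 1) * p)).map (fun b => b + p) := by
    simp only [List.map_map]
    apply List.map_congr_left
    intro k _
    simp only [Function.comp]
    ring_nf
  have htg : (List.range n).map (fun (k : Nat) => pyRoundHalf (u0 + (k : Int) * p + (u0 + (k : Int) * p + p)))
      = ((((List.range n).map (fun (k : Nat) => (1 : Int) + (k : Int))).map (fun i => u0 + (i - 1) * p)).zip (((List.range n).map (fun (k : Nat) => (1 : Int) + (k : Int))).map (fun i => u0 + (i - 1) * p) |>.map (fun b => b + p))).map (fun ba => pyRoundHalf (ba.1 + ba.2)) := by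
    simp only [List.map_map, List.zip_map', Function.comp]
    apply List.map_congr_left
    intro k _
    simp only [Function.comp_apply]
    congr 1
    ring
  refine Prod.ext ?_ (Prod.ext ?_ (Prod.ext ?_ (Prod.ext ?_ ?_)))
  · exact hkel
  · exact hbw
  · exact hat
  · exact htg
  · -- the dict component
    have hlen2 : ((List.range n).map (fun (k : Nat) => "A" ++ PySem.Int.toStr (1 + (k : Int)))).length
        = ((List.range n).map (fun (k : Nat) => pyRoundHalf (u0 + (k : Int) * p + (u0 + (k : Int) * p + p)))).length := by simp
    have hnd : ((List.range n).map (fun (k : Nat) => "A" ++ PySem.Int.toStr (1 + (k : Int)))).Nodup := by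
      have h0 := pv_kelas_nodup (j + 1)
      rw [hrange, List.map_map] at h0
      exact h0
    rw [pv_dict_zip _ _ hlen2 hnd]
    rw [hkel, htg]
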